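-- pv_equiv track=rewrite | github.com/slalit360/scalar_practice | DSA/String/change_char.py | change_char
-- ===== SOURCE A (Python) =====
-- def change_char(A, B):
--     # TC : O(n log n) : dict + sort
--     # DC : O(n)
--     char_freq = dict()
--     unique_char = 0
--     for i in A:
--         if i in char_freq:
--             char_freq[i] += 1
--         else:
--             char_freq[i] = 1
--             unique_char += 1
--
--     for _, freq in sorted(char_freq.items(), key=lambda item: item[1]):
--         if freq <= B:
--             B -= freq
--             unique_char -= 1
--
--         if B == 0:
--             break
--
--     return unique_char
-- ===== SOURCE B (Python) =====
-- def change_char(A, B):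
--     # bucket the character frequencies by value and spend the deletion budget
--     # over the possible frequency values 1..len(A) in one pass (no comparison sort)
--     freq = {}
--     for ch in A:
--         freq[ch] = freq.get(ch, 0) + 1
--     unique = len(freq)
--     buckets = {}
--     for f in freq.values():
--         buckets[f] = buckets.get(f, 0) + 1
--     budget = B if B > 0 else 0
--     for f in range(1, len(A) + 1):
--         k = min(buckets.get(f, 0), budget // f)
--         budget -= k * f
--         unique -= k
--     return unique
-- ===== Notes on version B (the rewrite author's own statement) =====
-- stated objective: alternative
-- what changed: Replaces A's comparison sort of the dict items and break-loop by bucketing the character frequencies by value and spending the deletion budget in one scan over the possible frequency values 1..len(A); same cost in practice since A only sorts the distinct characters.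
import Mathlib
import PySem

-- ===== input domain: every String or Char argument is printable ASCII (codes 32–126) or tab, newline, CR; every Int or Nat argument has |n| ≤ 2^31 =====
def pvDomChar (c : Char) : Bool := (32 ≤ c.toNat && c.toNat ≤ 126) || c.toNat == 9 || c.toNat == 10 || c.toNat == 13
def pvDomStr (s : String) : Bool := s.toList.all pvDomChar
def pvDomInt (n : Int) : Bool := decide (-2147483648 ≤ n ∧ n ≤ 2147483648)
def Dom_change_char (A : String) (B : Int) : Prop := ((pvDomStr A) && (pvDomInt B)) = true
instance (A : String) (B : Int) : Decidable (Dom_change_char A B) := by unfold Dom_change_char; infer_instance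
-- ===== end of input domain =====

-- B replaces A's comparison sort of the frequency dict items by bucketing the
-- frequencies by value and scanning the possible frequency values 1..len(A) once
-- (alternative algorithm; not claimed faster).

-- ===== PORT A =====
-- the 'for _, freq in sorted(...)' loop with its break, carrying (B, unique_char)
def changeCharLoopA : List (Char × Int) → Int → Int → Int
  | [], _, u => u
  | (_, freq) :: rest, b, u =>
    let b' := if freq ≤ b then b - freq else b
    let u' := if freq ≤ b then u - 1 else u
    if b' = 0 then u' else changeCharLoopA rest b' u'

def change_char (A : String) (B : Int) : Int :=
  let st := A.toList.foldl
    (fun (p : PySem.Dict Char Int × Int) i =>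
      if p.1.contains i then (p.1.modify i 0 (· + 1), p.2)
      else (p.1.insert i 1, p.2 + 1))
    (PySem.Dict.empty, 0)
  changeCharLoopA (PySem.List.sorted st.1.items (fun item => item.2) false) B st.2

-- ===== PORT B =====
-- 'for f in range(1, len(A)+1): k = min(buckets.get(f,0), budget // f); …'
def changeCharLoopB : List Int → PySem.Dict Int Int → Int → Int → Int
  | [], _, _, u => u
  | f :: fs, buckets, budget, u =>
    let k := min (buckets.getD f 0) (PySem.Int.floordiv budget f)
    changeCharLoopB fs buckets (budget - k * f) (u - k)

def change_char_alt (A : String) (B : Int) : Int :=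
  let freq := A.toList.foldl (fun d ch => d.insert ch (d.getD ch 0 + 1)) PySem.Dict.empty
  let unique : Int := freq.size
  let buckets := freq.values.foldl (fun d f => d.insert f (d.getD f 0 + 1)) PySem.Dict.empty
  let budget := if B > 0 then B else 0
  changeCharLoopB (PySem.List.pyRange 1 ((PySem.Str.len A : Int) + 1) 1) buckets budget unique

-- ===== PRECONDITION & SPEC =====
def Spec_change_char (A : String) (B : Int) (out : Int) : Prop := out = change_char_alt A B
instance (A : String) (B : Int) (out : Int) : Decidable (Spec_change_char A B out) := by unfold Spec_change_char; infer_instance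

-- ===== CLAIM (what is proved, stated in full; the proofs are below) =====
def Claim_equal_change_char : Prop := ∀ (A : String) (B : Int), Dom_change_char A B → Spec_change_char A B (change_char A B)

-- ===== LEMMAS AND PROOFS =====

-- number of frequencies the greedy removes, scanning the list left to right
def gRem : List Int → Int → Int
  | [], _ => 0
  | f :: r, b => if f ≤ b then 1 + gRem r (b - f) else gRem r b

theorem gRem_of_nonpos (L : List Int) (b : Int) (hb : b ≤ 0) (hL : ∀ f ∈ L, 1 ≤ f) :
    gRem L b = 0 := by
  induction L with
  | nil => rfl
  | cons f r ih =>
    have hf := hL f (by simp)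
    simp only [gRem, if_neg (by omega : ¬ f ≤ b)]
    exact ih (fun x hx => hL x (by simp [hx]))

theorem loopA_eq (items : List (Char × Int)) : ∀ (b u : Int),
    (∀ p ∈ items, 1 ≤ p.2) → changeCharLoopA items b u = u - gRem (items.map Prod.snd) b := by
  induction items with
  | nil => intro b u _; simp [changeCharLoopA, gRem]
  | cons p rest ih =>
    intro b u hpos
    obtain ⟨c, f⟩ := p
    have hf : 1 ≤ f := hpos (c, f) (by simp)
    have hrest : ∀ q ∈ rest, 1 ≤ q.2 := fun q hq => hpos q (by simp [hq])
    have hrest' : ∀ x ∈ rest.map Prod.snd, 1 ≤ x := by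
      intro x hx; obtain ⟨q, hq, rfl⟩ := List.mem_map.mp hx; exact hrest q hq
    by_cases hfb : f ≤ b
    · simp only [changeCharLoopA, if_pos hfb, List.map_cons, gRem]
      by_cases hz : b - f = 0
      · rw [if_pos hz, hz, gRem_of_nonpos _ 0 le_rfl hrest']; omega
      · rw [if_neg hz, ih (b - f) (u - 1) hrest]; omega
    · simp only [changeCharLoopA, if_neg hfb, List.map_cons, gRem]
      by_cases hz : b = 0
      · rw [if_pos hz, hz, gRem_of_nonpos _ 0 le_rfl hrest']; omega
      · rw [if_neg hz, ih b u hrest]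

theorem gRem_replicate (c : Nat) (f : Int) (hf : 1 ≤ f) : ∀ (b : Int), 0 ≤ b → ∀ (rest : List Int),
    gRem (List.replicate c f ++ rest) b =
      min (c : Int) (b / f) + gRem rest (b - f * min (c : Int) (b / f)) := by
  induction c with
  | zero =>
    intro b hb rest
    have h0 : 0 ≤ b / f := Int.ediv_nonneg hb (by omega)
    simp [min_eq_left h0]
  | succ c ih =>
    intro b hb rest
    by_cases hfb : f ≤ b
    · have hb' : 0 ≤ b - f := by omega
      have hdiv : b / f = (b - f) / f + 1 := by
        have := Int.add_mul_ediv_right (b - f) 1 (by omega : f ≠ 0)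
        simp at this; omega
      have h0 : 0 ≤ (b - f) / f := Int.ediv_nonneg hb' (by omega)
      have hmin : min ((c : Int) + 1) (b / f) = min (c : Int) ((b - f) / f) + 1 := by
        rw [hdiv]; omega
      rw [List.replicate_succ, List.cons_append]
      simp only [gRem, if_pos hfb]
      rw [ih (b - f) hb' rest]
      push_cast [hmin]
      ring_nf
    · have hdiv : b / f = 0 := Int.ediv_eq_zero_of_lt hb (by omega)
      have h1 : min ((c : Int) + 1) (b / f) = 0 := by rw [hdiv]; omega
      have h2 : min ((c : Int)) (b / f) = 0 := by rw [hdiv]; omega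
      rw [List.replicate_succ, List.cons_append]
      simp only [gRem, if_neg hfb]
      rw [ih b hb rest]
      push_cast [h1, h2]
      simp

theorem loopB_eq (cnt : Int → Nat) (bk : PySem.Dict Int Int)
    (hbk : ∀ f, bk.getD f 0 = (cnt f : Int)) :
    ∀ (fs : List Int) (b u : Int), 0 ≤ b → (∀ f ∈ fs, 1 ≤ f) →
    changeCharLoopB fs bk b u = u - gRem (fs.flatMap (fun f => List.replicate (cnt f) f)) b := by
  intro fs
  induction fs with
  | nil => intro b u _ _; simp [changeCharLoopB, gRem]
  | cons f fs ih =>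
    intro b u hb hpos
    have hf : 1 ≤ f := hpos f (by simp)
    have hfd : PySem.Int.floordiv b f = b / f := PySem.Int.floordiv_eq_ediv_of_pos (by omega)
    have h0 : 0 ≤ b / f := Int.ediv_nonneg hb (by omega)
    simp only [changeCharLoopB, hbk, hfd]
    set k : Int := min ((cnt f : Int)) (b / f) with hk
    have hkdiv : k ≤ b / f := min_le_right _ _
    have hk0 : 0 ≤ k := by omega
    have hfk : f * k ≤ b := by
      calc f * k ≤ f * (b / f) :=
            mul_le_mul_of_nonneg_left hkdiv (by omega)
        _ = b / f * f := mul_comm _ _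
        _ ≤ b := Int.ediv_mul_le b (by omega)
    have hb' : 0 ≤ b - k * f := by rw [mul_comm]; omega
    rw [ih (b - k * f) (u - k) hb' (fun x hx => hpos x (by simp [hx]))]
    rw [List.flatMap_cons, gRem_replicate (cnt f) f hf b hb, ← hk]
    rw [mul_comm k f]; omega

theorem foldPair (l : List Char) : ∀ (d : PySem.Dict Char Int) (u : Int),
    d.keys.Nodup → u = (d.size : Int) →
    l.foldl (fun (p : PySem.Dict Char Int × Int) i =>
        if p.1.contains i then (p.1.modify i 0 (· + 1), p.2)
        else (p.1.insert i 1, p.2 + 1)) (d, u)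
    = (l.foldl (fun d x => d.modify x 0 (· + 1)) d,
       ((l.foldl (fun d x => d.modify x 0 (· + 1)) d).size : Int)) := by
  induction l with
  | nil => intro d u hnd hu; simp [hu]
  | cons x l ih =>
    intro d u hnd hu
    have hmod : d.modify x 0 (· + 1) = d.insert x (d.getD x 0 + 1) := rfl
    by_cases hc : d.contains x = true
    · simp only [List.foldl_cons, if_pos hc]
      refine ih _ u ?_ ?_
      · rw [hmod]; exact PySem.Dict.nodup_keys_insert _ _ _ hnd
      · rw [hmod, PySem.Dict.size_insert, if_pos hc, hu]
    · rw [Bool.not_eq_true] at hc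
      simp only [List.foldl_cons, hc, Bool.false_eq_true, if_false]
      have h1 : d.insert x 1 = d.modify x 0 (· + 1) := by
        have h0 : d.getD x 0 = 0 := by
          simp [PySem.Dict.getD_of_not_contains, hc]
        rw [hmod, h0]; norm_num
      rw [h1]
      refine ih _ (u + 1) ?_ ?_
      · rw [hmod]; exact PySem.Dict.nodup_keys_insert _ _ _ hnd
      · rw [hmod, PySem.Dict.size_insert, if_neg (by simp [hc]), hu]; push_cast; ring

theorem flat_count (vals : List Int) : ∀ (fs : List Int), fs.Nodup → ∀ x : Int,
    (fs.flatMap (fun f => List.replicate (vals.count f) f)).count x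
      = if x ∈ fs then vals.count x else 0 := by
  intro fs
  induction fs with
  | nil => intro _ x; simp
  | cons f fs ih =>
    intro hnd x
    have hf : f ∉ fs := (List.nodup_cons.mp hnd).1
    rw [List.flatMap_cons, List.count_append, List.count_replicate,
        ih (List.nodup_cons.mp hnd).2 x]
    by_cases hx : x = f
    · subst hx; simp [hf]
    · simp [hx, Ne.symm hx]

theorem flat_pairwise (cnt : Int → Nat) : ∀ (fs : List Int), fs.Pairwise (· ≤ ·) →
    (fs.flatMap (fun f => List.replicate (cnt f) f)).Pairwise (fun a b : Int => a ≤ b) := by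
  intro fs
  induction fs with
  | nil => intro _; simp
  | cons f fs ih =>
    intro hp
    rw [List.flatMap_cons, List.pairwise_append]
    refine ⟨List.pairwise_replicate.mpr (Or.inr le_rfl), ih (List.pairwise_cons.mp hp).2, ?_⟩
    intro a ha b hb
    rw [List.eq_of_mem_replicate ha]
    obtain ⟨g, hg, hbg⟩ := List.mem_flatMap.mp hb
    rw [List.eq_of_mem_replicate hbg]
    exact (List.pairwise_cons.mp hp).1 g hg

theorem change_char_main (A : String) (B : Int) : change_char A B = change_char_alt A B := by
  set l := A.toList with hl
  set vals := (PySem.Dict.counter l (κ := Char)).values with hvals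
  -- the two frequency dicts are the same Counter
  have hB : l.foldl (fun d ch => d.insert ch (d.getD ch 0 + 1)) PySem.Dict.empty
      = PySem.Dict.counter l := PySem.Dict.foldl_insert_getD_add_one_eq_counter l
  have hA : l.foldl
      (fun (p : PySem.Dict Char Int × Int) i =>
        if p.1.contains i then (p.1.modify i 0 (· + 1), p.2)
        else (p.1.insert i 1, p.2 + 1)) (PySem.Dict.empty, 0)
      = (PySem.Dict.counter l, ((PySem.Dict.counter l).size : Int)) := by
    rw [foldPair l PySem.Dict.empty 0 (PySem.Dict.nodup_keys_empty) (by simp [PySem.Dict.size_empty])]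
    rfl
  -- facts about the values of the counter
  have hv : ∀ v ∈ vals, 1 ≤ v ∧ v ≤ (l.length : Int) := by
    intro v hv
    rw [hvals] at hv
    have : (PySem.Dict.counter l (κ := Char)).values
        = (PySem.Dict.counter l (κ := Char)).items.map (·.2) := rfl
    rw [this, PySem.Dict.items_counter, List.map_map] at hv
    obtain ⟨k, hk, rfl⟩ := List.mem_map.mp hv
    have hkl : k ∈ l := (PySem.Set.mem_ofList _ _).mp hk
    simp only [Function.comp]
    constructor
    · exact_mod_cast List.count_pos_iff.mpr hkl
    · exact_mod_cast List.count_le_length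
  -- the sorted frequency list equals the bucket expansion
  set n : Int := (l.length : Int) with hn
  set fs := PySem.List.pyRange 1 (n + 1) 1 with hfs
  set E := fs.flatMap (fun f => List.replicate (vals.count f) f) with hE
  set S := (PySem.List.sorted (PySem.Dict.counter l (κ := Char)).items
      (fun item => item.2) false).map Prod.snd with hS
  have hfs_mem : ∀ f ∈ fs, 1 ≤ f := by
    intro f hf
    exact ((PySem.List.mem_pyRange_one).mp hf).1
  have hSperm : S.Perm vals := by
    rw [hS, hvals]
    exact (PySem.List.sorted_perm _ _ _).map Prod.snd
  have hEperm : E.Perm vals := by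
    refine (List.perm_iff_count).mpr ?_
    intro x
    rw [hE, flat_count vals fs (by rw [hfs]; exact PySem.List.nodup_pyRange_one 1 (n+1)) x]
    by_cases hx : x ∈ fs
    · simp [hx]
    · rw [if_neg hx]
      refine (List.count_eq_zero.mpr ?_).symm
      intro hxv
      exact hx ((PySem.List.mem_pyRange_one).mpr ⟨(hv x hxv).1, by have := (hv x hxv).2; omega⟩)
  have hSsort : S.Pairwise (fun a b : Int => a ≤ b) := by
    rw [hS]; exact PySem.List.sorted_map_key_pairwise _ _
  have hEsort : E.Pairwise (fun a b : Int => a ≤ b) := by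
    rw [hE]
    refine flat_pairwise _ fs ?_
    rw [hfs]
    exact (PySem.List.pairwise_lt_pyRange_one _ _).imp le_of_lt
  have hSE : S = E :=
    (hSperm.trans hEperm.symm).eq_of_pairwise
      (fun a b _ _ h1 h2 => le_antisymm h1 h2) hSsort hEsort
  -- positivity of the frequencies in the sorted items
  have hpos : ∀ p ∈ PySem.List.sorted (PySem.Dict.counter l (κ := Char)).items
      (fun item => item.2) false, 1 ≤ p.2 := by
    intro p hp
    have hmem : p ∈ (PySem.Dict.counter l (κ := Char)).items :=
      (PySem.List.mem_sorted _ _ _ p).mp hp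
    have : p.2 ∈ vals := by
      rw [hvals]
      exact List.mem_map.mpr ⟨p, hmem, rfl⟩
    exact (hv _ this).1
  have hEpos : ∀ x ∈ E, 1 ≤ x := by
    intro x hx
    rw [hE] at hx
    obtain ⟨g, hg, hxg⟩ := List.mem_flatMap.mp hx
    rw [List.eq_of_mem_replicate hxg]
    exact hfs_mem g hg
  -- buckets lookup = count among vals
  have hbk : ∀ f : Int, (vals.foldl (fun d f => d.insert f (d.getD f 0 + 1))
      (PySem.Dict.empty (κ := Int) (ν := Int))).getD f 0 = ((vals.count f : Nat) : Int) := by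
    intro f
    rw [PySem.Dict.getD_foldl_insert_add_one, PySem.Dict.getD_empty]
    ring
  -- assemble
  have hAeq : change_char A B
      = ((PySem.Dict.counter l (κ := Char)).size : Int) - gRem S B := by
    simp only [change_char]
    rw [← hl, hA]
    dsimp only
    rw [loopA_eq _ B _ hpos, ← hS]
  have hBeq : change_char_alt A B
      = ((PySem.Dict.counter l (κ := Char)).size : Int)
        - gRem E (if B > 0 then B else 0) := by
    simp only [change_char_alt, PySem.Str.len_eq]
    rw [← hl, hB, ← hvals, ← hn, ← hfs]
    rw [loopB_eq (fun f => vals.count f) _ hbk fs (if B > 0 then B else 0) _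
        (by split <;> omega) hfs_mem]
  rw [hAeq, hBeq, hSE]
  by_cases hBpos : B > 0
  · rw [if_pos hBpos]
  · rw [if_neg hBpos, gRem_of_nonpos E B (by omega) hEpos,
        gRem_of_nonpos E 0 (by omega) hEpos]

-- ===== VERDICT (by name: the statement is the Claim_ definition above) =====
theorem change_char_spec : Claim_equal_change_char := by
  intro A B _
  unfold Spec_change_char
  exact change_char_main A B
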